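-- pv_equiv track=rewrite | github.com/h083onis/thesis_data2 | pre_process/code/preprocess_data.py | make_index_dict
-- ===== SOURCE A (Python) =====
-- def make_index_dict(word_dict:dict, min_freq=3) -> None:
--     tmp_dict = {key:value for key, value in word_dict.items() if value >= int(min_freq)}
--     special_tokens = ['<unk>', '<pad>']
--     dict = {token : i for i, token in enumerate(special_tokens)}
--     appear_list = sorted(tmp_dict.items(), key= lambda word : word[1], reverse=True)
--     for i, word in enumerate(appear_list, len(special_tokens)):
--         dict[word[0]] = i
--     return dict
-- ===== SOURCE B (Python) =====
-- def make_index_dict(word_dict: dict, min_freq=3) -> None: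
--     buckets = {}
--     for key, value in word_dict.items():
--         if value >= int(min_freq):
--             buckets.setdefault(value, []).append(key)
--     result = {'<unk>': 0, '<pad>': 1}
--     i = 2
--     for freq in sorted(buckets, reverse=True):
--         for word in buckets[freq]:
--             result[word] = i
--             i += 1
--     return result
-- ===== Notes on version B (the rewrite author's own statement) =====
-- stated objective: alternative
-- what changed: Instead of stably reverse-sorting all filtered items by frequency, B groups words into insertion-ordered buckets keyed by frequency in one pass and then emits the buckets in order of the (few) distinct frequencies sorted descending, assigning consecutive indices.
import Mathlib
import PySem

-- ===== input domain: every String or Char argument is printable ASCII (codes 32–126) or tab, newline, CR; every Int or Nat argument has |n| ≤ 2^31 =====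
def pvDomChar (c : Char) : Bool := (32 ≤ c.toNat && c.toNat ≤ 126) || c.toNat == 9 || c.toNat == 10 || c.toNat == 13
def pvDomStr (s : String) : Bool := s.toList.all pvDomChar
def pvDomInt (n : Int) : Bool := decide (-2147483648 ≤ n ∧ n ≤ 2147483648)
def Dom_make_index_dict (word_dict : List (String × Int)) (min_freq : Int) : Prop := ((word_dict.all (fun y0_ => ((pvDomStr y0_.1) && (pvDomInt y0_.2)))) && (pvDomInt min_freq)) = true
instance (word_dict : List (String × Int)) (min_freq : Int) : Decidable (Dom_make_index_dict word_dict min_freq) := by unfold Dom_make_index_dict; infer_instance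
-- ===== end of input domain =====

-- B replaces A's stable reverse-sort of all filtered items by frequency buckets plus a
-- descending sort of the distinct frequencies (alternative algorithm; identical results).


-- ===== PORT A =====
def make_index_dict (word_dict : List (String × Int)) (min_freq : Int) : List (String × Int) :=
  -- tmp_dict = {key:value for key, value in word_dict.items() if value >= int(min_freq)}
  let tmp_dict : PySem.Dict String Int :=
    word_dict.foldl (fun d p => if p.2 ≥ min_freq then d.insert p.1 p.2 else d) PySem.Dict.empty
  let special_tokens : List String := ["<unk>", "<pad>"]
  -- dict = {token : i for i, token in enumerate(special_tokens)}
  let d : PySem.Dict String Int :=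
    (PySem.List.enumerate special_tokens).foldl (fun d p => d.insert p.2 p.1) PySem.Dict.empty
  -- appear_list = sorted(tmp_dict.items(), key=lambda word: word[1], reverse=True)
  let appear_list := PySem.List.sorted tmp_dict.items (fun w => w.2) true
  -- for i, word in enumerate(appear_list, len(special_tokens)): dict[word[0]] = i
  let d := (PySem.List.enumerate appear_list (special_tokens.length : Int)).foldl
    (fun d p => d.insert p.2.1 p.1) d
  d.items

-- ===== PORT B =====
def make_index_dict_alt (word_dict : List (String × Int)) (min_freq : Int) : List (String × Int) :=
  -- buckets.setdefault(value, []).append(key) for the items with value >= int(min_freq)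
  let buckets : PySem.Dict Int (List String) :=
    word_dict.foldl (fun d p => if p.2 ≥ min_freq then d.modify p.2 [] (fun l => l ++ [p.1]) else d)
      PySem.Dict.empty
  -- result = {'<unk>': 0, '<pad>': 1}
  let result : PySem.Dict String Int :=
    (PySem.Dict.empty.insert "<unk>" 0).insert "<pad>" 1
  -- for freq in sorted(buckets, reverse=True): for word in buckets[freq]: result[word] = i; i += 1
  -- (buckets[freq] ported as getD freq []: freq ranges over buckets' own keys, so no KeyError)
  let st := (PySem.List.sorted buckets.keys (fun f => f) true).foldl
    (fun (st : PySem.Dict String Int × Int) f =>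
      (buckets.getD f []).foldl (fun st w => (st.1.insert w st.2, st.2 + 1)) st)
    (result, 2)
  st.1.items

-- ===== PRECONDITION & SPEC =====
-- Pre_ excludes association lists with duplicate keys: the Python parameter is a dict,
-- which cannot carry duplicate keys, so such lists correspond to no actual input of A.
def Pre_make_index_dict (word_dict : List (String × Int)) (min_freq : Int) : Prop :=
  (word_dict.map (fun p => p.1)).Nodup
instance (word_dict : List (String × Int)) (min_freq : Int) : Decidable (Pre_make_index_dict word_dict min_freq) := by unfold Pre_make_index_dict; infer_instance
def pvWitness_make_index_dict : (List (String × Int)) × Int := ([("a", 5), ("bb", 3), ("c", 5), ("d", 1)], 3)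

def Spec_make_index_dict (word_dict : List (String × Int)) (min_freq : Int) (out : List (String × Int)) : Prop := out = make_index_dict_alt word_dict min_freq
instance (word_dict : List (String × Int)) (min_freq : Int) (out : List (String × Int)) : Decidable (Spec_make_index_dict word_dict min_freq out) := by unfold Spec_make_index_dict; infer_instance

-- ===== CLAIM (what is proved, stated in full; the proofs are below) =====
def Claim_equal_make_index_dict : Prop := ∀ (word_dict : List (String × Int)) (min_freq : Int), Dom_make_index_dict word_dict min_freq → Pre_make_index_dict word_dict min_freq → Spec_make_index_dict word_dict min_freq (make_index_dict word_dict min_freq)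

-- ===== LEMMAS AND PROOFS =====

-- the consecutive-index insertion run both final loops perform
def pvRun (d : PySem.Dict String Int) (i : Int) : List String → PySem.Dict String Int
  | [] => d
  | w :: ws => pvRun (d.insert w i) (i + 1) ws

-- insertBy skips a block of elements it does not go before
theorem pv_insertBy_skip {α : Type} (before : α → α → Bool) (x : α) (as bs : List α)
    (h : ∀ a ∈ as, before x a = false) :
    PySem.List.insertBy before x (as ++ bs) = as ++ PySem.List.insertBy before x bs := by
  induction as with
  | nil => simp
  | cons a as ih =>
    simp only [List.cons_append, PySem.List.insertBy, h a (by simp)]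
    simp only [Bool.false_eq_true, if_false, List.cons.injEq, true_and]
    exact ih (fun a ha => h a (by simp [ha]))

-- insertBy puts x in front when it goes before everything
theorem pv_insertBy_front {α : Type} (before : α → α → Bool) (x : α) (ys : List α)
    (h : ∀ y ∈ ys, before x y = true) :
    PySem.List.insertBy before x ys = x :: ys := by
  cases ys with
  | nil => simp [PySem.List.insertBy]
  | cons y ys => simp [PySem.List.insertBy, h y (by simp)]

-- one insertBy step of the stable reverse-sort lands at the end of its own frequency bucket
theorem pv_step (ds : List Int) (l : List (String × Int)) (x : String × Int)
    (hd : ds.Pairwise (· > ·)) (hx : x.2 ∈ ds) :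
    PySem.List.insertBy (fun a b => decide (b.2 < a.2)) x
      (ds.flatMap (fun f => l.filter (fun p => p.2 == f))) =
    ds.flatMap (fun f => (l ++ [x]).filter (fun p => p.2 == f)) := by
  induction ds with
  | nil => simp at hx
  | cons f rest ih =>
    have hlt : ∀ g ∈ rest, g < f := fun g hg => (List.pairwise_cons.1 hd).1 g hg
    by_cases hxf : x.2 = f
    · -- x belongs to the head bucket
      rw [List.flatMap_cons, List.flatMap_cons]
      rw [pv_insertBy_skip _ _ _ _ (by
        intro a ha
        have : a.2 = f := by simpa using (List.mem_filter.1 ha).2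
        simp [this, hxf])]
      have htail : ∀ y ∈ rest.flatMap (fun g => l.filter (fun p => p.2 == g)),
          (fun a b => decide (b.2 < a.2)) x y = true := by
        intro y hy
        obtain ⟨g, hg, hyg⟩ := List.mem_flatMap.1 hy
        have : y.2 = g := by simpa using (List.mem_filter.1 hyg).2
        simp [this, hxf]; exact hlt g hg
      rw [pv_insertBy_front _ _ _ htail]
      have hhead : (l ++ [x]).filter (fun p => p.2 == f) = l.filter (fun p => p.2 == f) ++ [x] := by
        simp [List.filter_append, hxf]
      have hrest : rest.flatMap (fun g => (l ++ [x]).filter (fun p => p.2 == g)) =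
          rest.flatMap (fun g => l.filter (fun p => p.2 == g)) := by
        apply List.flatMap_congr
        intro g hg
        have : x.2 ≠ g := by have := hlt g hg; omega
        simp [List.filter_append, this]
      rw [hhead, hrest]
      simp
    · -- x belongs to a later bucket
      have hxrest : x.2 ∈ rest := by
        rcases List.mem_cons.1 hx with h | h
        · exact absurd h hxf
        · exact h
      rw [List.flatMap_cons, List.flatMap_cons]
      have hf : x.2 < f := hlt _ hxrest
      rw [pv_insertBy_skip _ _ _ _ (by
        intro a ha
        have : a.2 = f := by simpa using (List.mem_filter.1 ha).2
        simp [this]; omega)]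
      rw [ih (List.pairwise_cons.1 hd).2 hxrest]
      have : (l ++ [x]).filter (fun p => p.2 == f) = l.filter (fun p => p.2 == f) := by
        simp [List.filter_append, hxf]
      rw [this]

-- the stable descending sort is the concatenation of the frequency buckets taken in
-- strictly descending frequency order
theorem pv_sorted_eq_flatMap (ds : List Int) (l : List (String × Int))
    (hd : ds.Pairwise (· > ·)) (hm : ∀ p ∈ l, p.2 ∈ ds) :
    PySem.List.sorted l (fun p => p.2) true =
      ds.flatMap (fun f => l.filter (fun p => p.2 == f)) := by
  rw [PySem.List.sorted_rev_eq_foldl_insertBy]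
  induction l using List.reverseRecOn with
  | nil => simp
  | append_singleton l x ih =>
    rw [List.foldl_append, List.foldl_cons, List.foldl_nil]
    rw [ih (fun p hp => hm p (by simp [hp]))]
    exact pv_step ds l x hd (hm x (by simp))

-- A's enumerate-driven insertion loop is a pvRun over the word column
theorem pv_enum_foldl (l : List (String × Int)) (d : PySem.Dict String Int) (i : Int) :
    (PySem.List.enumerate l i).foldl (fun d p => d.insert p.2.1 p.1) d =
      pvRun d i (l.map (fun p => p.1)) := by
  induction l generalizing d i with
  | nil => simp [PySem.List.enumerate, pvRun]
  | cons x xs ih => simp [PySem.List.enumerate, pvRun, ih]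

-- B's (dict, counter) inner loop is a pvRun that also counts
theorem pv_pair_foldl (ws : List String) (d : PySem.Dict String Int) (i : Int) :
    ws.foldl (fun (st : PySem.Dict String Int × Int) w => (st.1.insert w st.2, st.2 + 1)) (d, i) =
      (pvRun d i ws, i + ws.length) := by
  induction ws generalizing d i with
  | nil => simp [pvRun]
  | cons w ws ih => simp [pvRun, ih]; omega

theorem pv_run_append (as bs : List String) (d : PySem.Dict String Int) (i : Int) :
    pvRun d i (as ++ bs) = pvRun (pvRun d i as) (i + as.length) bs := by
  induction as generalizing d i with
  | nil => simp [pvRun]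
  | cons a as ih => simp [pvRun, ih]; ring_nf

-- B's nested loop is a single pvRun over the concatenated buckets
theorem pv_nested (B : Int → List String) (fs : List Int) (d : PySem.Dict String Int) (i : Int) :
    fs.foldl (fun (st : PySem.Dict String Int × Int) f =>
        (B f).foldl (fun st w => (st.1.insert w st.2, st.2 + 1)) st) (d, i) =
      (pvRun d i (fs.flatMap B), i + (fs.flatMap B).length) := by
  induction fs generalizing d i with
  | nil => simp [pvRun]
  | cons f fs ih =>
    rw [List.foldl_cons, pv_pair_foldl, ih, List.flatMap_cons, pv_run_append]
    simp; omega

theorem pv_main (wd : List (String × Int)) (mf : Int) (hpre : (wd.map (fun p => p.1)).Nodup) :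
    make_index_dict wd mf = make_index_dict_alt wd mf := by
  set F := wd.filter (fun p => decide (p.2 ≥ mf)) with hF
  -- A's filter-comprehension fold is a fold over the filtered list
  have hfoldA : wd.foldl (fun d p => if p.2 ≥ mf then d.insert p.1 p.2 else d) PySem.Dict.empty
      = F.foldl (fun d p => d.insert p.1 p.2) PySem.Dict.empty := by
    rw [hF, List.foldl_filter]; simp
  have hkeysF : (F.map (fun p => p.1)).Nodup :=
    hpre.sublist (List.filter_sublist.map _)
  have hitems : (F.foldl (fun d p => d.insert p.1 p.2) PySem.Dict.empty).items = F := by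
    rw [PySem.Dict.items_foldl_insert_fresh F (fun p => p.1) (fun p => p.2) PySem.Dict.empty
      (by intro a _; simp [PySem.Dict.empty, PySem.Dict.contains]) hkeysF]
    simp [PySem.Dict.empty]
  -- B's bucket-building fold is a fold over the filtered list
  have hfoldB : wd.foldl
        (fun d p => if p.2 ≥ mf then d.modify p.2 [] (fun l => l ++ [p.1]) else d)
        PySem.Dict.empty
      = F.foldl (fun d p => d.modify p.2 [] (fun l => l ++ [p.1])) PySem.Dict.empty := by
    rw [hF, List.foldl_filter]; simp
  set buckets := F.foldl (fun d p => d.modify p.2 [] (fun l => l ++ [p.1]))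
      (PySem.Dict.empty : PySem.Dict Int (List String)) with hbk
  have hgetD : ∀ f, buckets.getD f [] = (F.filter (fun p => p.2 == f)).map (fun p => p.1) := by
    intro f
    have hswap : buckets = (F.map Prod.swap).foldl
        (fun d q => d.modify q.1 [] (fun l => l ++ [q.2])) PySem.Dict.empty := by
      rw [hbk, List.foldl_map]; simp
    rw [hswap, PySem.Dict.getD_foldl_modify_append]
    simp [List.filter_map, Function.comp_def]
  have hkeys : buckets.keys = PySem.Set.update (PySem.Dict.empty : PySem.Dict Int (List String)).keys
      (F.map (fun p => p.2)) :=
    PySem.Dict.keys_foldl_modify_key F (fun p => p.2) [] (fun _ p => fun l => l ++ [p.1]) _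
  have hnodupk : buckets.keys.Nodup :=
    PySem.Dict.nodup_keys_foldl_modify_key F (fun p => p.2) [] (fun _ p => fun l => l ++ [p.1]) _
      (by simp [PySem.Dict.empty, PySem.Dict.keys])
  set ds := PySem.List.sorted buckets.keys (fun f => f) true with hds
  have hdsnd : ds.Nodup := (PySem.List.sorted_perm buckets.keys (fun f => f) true).nodup_iff.2 hnodupk
  have hdsp : ds.Pairwise (· > ·) := by
    have h1 := PySem.List.sorted_pairwise_rev buckets.keys (fun f => f)
    have := List.Pairwise.and h1 hdsnd
    exact this.imp (fun {a b} h => lt_of_le_of_ne h.1 (fun hEq => h.2 hEq.symm))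
  have hmem : ∀ p ∈ F, p.2 ∈ ds := by
    intro p hp
    rw [hds, PySem.List.mem_sorted, hkeys, PySem.Set.mem_update]
    right
    exact List.mem_map.2 ⟨p, hp, rfl⟩
  -- the stable reverse-sorted appear_list is the descending concatenation of the buckets
  have happear : PySem.List.sorted F (fun w => w.2) true
      = ds.flatMap (fun f => F.filter (fun p => p.2 == f)) :=
    pv_sorted_eq_flatMap ds F hdsp hmem
  have hd0 : (PySem.List.enumerate ["<unk>", "<pad>"]).foldl
      (fun (d : PySem.Dict String Int) p => d.insert p.2 p.1) PySem.Dict.empty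
      = (PySem.Dict.empty.insert "<unk>" (0:Int)).insert "<pad>" 1 := by rfl
  simp only [make_index_dict, make_index_dict_alt]
  rw [hfoldA, hfoldB, hitems, happear, hd0]
  rw [show ((["<unk>", "<pad>"] : List String).length : Int) = 2 from rfl]
  rw [pv_enum_foldl, pv_nested]
  simp only [← hds, List.map_flatMap]
  exact congrArg (fun l => (pvRun ((PySem.Dict.empty.insert "<unk>" 0).insert "<pad>" 1) 2 l).items)
    (List.flatMap_congr (fun f hf => (hgetD f).symm))

-- ===== VERDICT (by name: the statement is the Claim_ definition above) =====
theorem make_index_dict_spec : Claim_equal_make_index_dict := by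
  intro wd mf _ hpre
  exact pv_main wd mf hpre
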